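-- pv_equiv track=rewrite | github.com/LeudoNeto/my-codewars-solutions | kyu 6/faro-shuffle-count.py | faro_cycles
-- ===== SOURCE A (Python) =====
-- def faro_cycles(ds):
--     i = 0
--     baralho = list(range(0,ds))
--     atual = baralho
--     while atual != baralho or i == 0:
--         novo = []
--         for x in atual[::2]:
--             novo.append(x)
--         for x in atual[1::2]:
--             novo.append(x)
--         i = i + 1
--         atual = novo
--     return i
-- ===== SOURCE B (Python) =====
-- def faro_cycles(ds):
--     # a deck this small is unchanged by one shuffle
--     if ds < 3:
--         return 1
--     # the deal-into-two-piles shuffle acts as k -> 2*k mod m, so the cycle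
--     # count is the multiplicative order of 2 modulo m
--     m = ds if ds % 2 == 1 else ds - 1
--     t = 2 % m
--     c = 1
--     while t != 1:
--         t = t * 2 % m
--         c += 1
--     return c
-- ===== Notes on version B (the rewrite author's own statement) =====
-- stated objective: faster
-- what changed: Instead of simulating the shuffle on the whole deck until it returns to the initial order, B exploits that the deal-into-two-piles shuffle acts on positions as k -> 2k mod m (m = ds if odd, else ds-1) and computes the multiplicative order of 2 mod m with a single modular counter; trivially small decks need exactly one shuffle.
import Mathlib
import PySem

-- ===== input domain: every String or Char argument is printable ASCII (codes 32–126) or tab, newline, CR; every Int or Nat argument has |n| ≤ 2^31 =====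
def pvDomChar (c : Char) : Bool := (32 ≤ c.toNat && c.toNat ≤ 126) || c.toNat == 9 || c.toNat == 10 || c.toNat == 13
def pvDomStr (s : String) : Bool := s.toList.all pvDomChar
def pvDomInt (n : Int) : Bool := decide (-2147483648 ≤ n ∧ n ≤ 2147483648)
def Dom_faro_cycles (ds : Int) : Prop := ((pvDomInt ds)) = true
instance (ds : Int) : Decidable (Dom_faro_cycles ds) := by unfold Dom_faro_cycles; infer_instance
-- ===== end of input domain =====

-- B replaces A's repeated full-deck shuffle simulation by the multiplicative order of 2 mod m (m = ds if odd, else ds-1).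

-- ===== PORT A =====
-- hand port of the slice atual[::2] (PySem.List.slice? computes the same list but via
-- indexed access; this tail-recursive linear stepper is exact for a [::2] slice:
-- every 2nd element from index 0, in order)
def pvEvery2Aux (acc : List Int) : List Int → List Int
  | [] => acc.reverse
  | [a] => (a :: acc).reverse
  | a :: _ :: t => pvEvery2Aux (a :: acc) t

def pvEvery2 (l : List Int) : List Int := pvEvery2Aux [] l

-- one iteration of A's while body: novo = [], append atual[::2], append atual[1::2];
-- each 'for x in …: novo.append(x)' loop appends the traversed list element by element,
-- i.e. novo ++ that list (PySem.List.foldl_append_singleton); atual[1::2] is every 2nd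
-- element from index 1, i.e. pvEvery2 of the tail
def pvFaroStep (atual : List Int) : List Int :=
  let novo : List Int := []
  let novo := novo ++ pvEvery2 atual
  novo ++ pvEvery2 (atual.drop 1)

-- A's while loop; fuel is a totality guard only (proved sufficient on the admitted
-- inputs: the deck returns to the initial order in fewer than ds.toNat + 2 shuffles)
def pvFaroLoop (baralho : List Int) : Nat → List Int → Int → Int
  | 0, _, i => i
  | fuel+1, atual, i =>
    if (atual != baralho) || (i == 0) then
      pvFaroLoop baralho fuel (pvFaroStep atual) (i + 1)
    else i

def faro_cycles (ds : Int) : Int :=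
  let baralho := PySem.List.pyRange 0 ds 1
  pvFaroLoop baralho (ds.toNat + 2) baralho 0

-- ===== PORT B =====
-- Source B's modulus m = ds if ds % 2 == 1 else ds - 1
def pvM (ds : Int) : Int := if PySem.Int.mod ds 2 = 1 then ds else ds - 1

-- Source B's while loop; fuel is a totality guard only (the order of 2 mod m is < m)
def pvOrdLoop (m : Int) : Nat → Int → Int → Int
  | 0, _, c => c
  | fuel+1, t, c =>
    if t ≠ 1 then pvOrdLoop m fuel (PySem.Int.mod (t * 2) m) (c + 1) else c

def faro_cycles_alt (ds : Int) : Int :=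
  if ds < 3 then 1
  else pvOrdLoop (pvM ds) (pvM ds).toNat (PySem.Int.mod 2 (pvM ds)) 1

-- ===== PRECONDITION & SPEC =====
def Spec_faro_cycles (ds : Int) (out : Int) : Prop := out = faro_cycles_alt ds
instance (ds : Int) (out : Int) : Decidable (Spec_faro_cycles ds out) := by unfold Spec_faro_cycles; infer_instance

-- ===== CLAIM (what is proved, stated in full; the proofs are below) =====
def Claim_equal_faro_cycles : Prop := ∀ (ds : Int), Dom_faro_cycles ds → Spec_faro_cycles ds (faro_cycles ds)

-- ===== LEMMAS AND PROOFS =====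

-- A's shuffle permutes positions: position k of the new deck holds old position σ k.
def pvSigma (n k : Nat) : Nat := if k < (n+1)/2 then 2*k else 2*(k - (n+1)/2) + 1

-- the deck after i shuffles of the identity deck [0,…,n-1]
def pvL (n i : Nat) : List Int := (List.range n).map (fun k => ((pvSigma n)^[i] k : Int))

-- proof-side direct recursion computing the same list as the tail-recursive pvEvery2
def pvEvery2D : List Int → List Int
  | [] => []
  | [a] => [a]
  | a :: _ :: t => a :: pvEvery2D t

lemma pv_every2Aux_eq : ∀ (l acc : List Int), pvEvery2Aux acc l = acc.reverse ++ pvEvery2D l := by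
  intro l
  induction l using pvEvery2D.induct with
  | case1 => intro acc; simp [pvEvery2Aux, pvEvery2D]
  | case2 a => intro acc; simp [pvEvery2Aux, pvEvery2D]
  | case3 a b t ih =>
    intro acc
    simp only [pvEvery2Aux, pvEvery2D, ih, List.reverse_cons, List.append_assoc,
      List.cons_append, List.nil_append]

lemma pv_every2_eq (l : List Int) : pvEvery2 l = pvEvery2D l := by
  simp [pvEvery2, pv_every2Aux_eq]

lemma pv_every2_map : ∀ (n : Nat) (g : Nat → Int),
    pvEvery2D ((List.range n).map g) = (List.range ((n+1)/2)).map (fun k => g (2*k)) := by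
  intro n
  induction n using Nat.strong_induction_on with
  | _ n ih =>
    match n with
    | 0 => intro g; simp [pvEvery2D]
    | 1 => intro g; simp [pvEvery2D, List.range_succ]
    | (n+2) =>
      intro g
      have hr2 : List.range (n+2) = 0 :: 1 :: (List.range n).map (fun k => k + 2) := by
        rw [List.range_succ_eq_map, List.range_succ_eq_map, List.map_cons, List.map_map]
        refine congrArg _ (congrArg _ (List.map_congr_left ?_))
        intro a _
        simp only [Function.comp]
      have hr1 : List.range ((n+3)/2) = 0 :: (List.range ((n+1)/2)).map (fun k => k + 1) := by
        rw [show (n+3)/2 = (n+1)/2 + 1 from by omega, List.range_succ_eq_map]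
      rw [hr2]
      simp only [List.map_cons, List.map_map, pvEvery2D]
      rw [ih n (by omega)]
      rw [show (n+2+1)/2 = (n+3)/2 from rfl, hr1]
      simp only [List.map_cons, List.map_map]
      rfl

lemma pv_slice_evens (n : Nat) (g : Nat → Int) :
    pvEvery2 ((List.range n).map g) = (List.range ((n+1)/2)).map (fun k => g (2*k)) := by
  rw [pv_every2_eq]; exact pv_every2_map n g

lemma pv_slice_odds (n : Nat) (g : Nat → Int) (hn : 1 ≤ n) :
    pvEvery2 (((List.range n).map g).drop 1)
      = (List.range (n/2)).map (fun k => g (2*k+1)) := by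
  have hdrop : ((List.range n).map g).drop 1 = (List.range (n-1)).map (fun k => g (k+1)) := by
    obtain ⟨m, rfl⟩ : ∃ m, n = m + 1 := ⟨n - 1, by omega⟩
    rw [List.range_succ_eq_map, List.map_cons, List.map_map, List.drop_one, List.tail_cons]
    rfl
  rw [hdrop, pv_every2_eq, pv_every2_map]
  rw [show (n-1+1)/2 = n/2 from by omega]

lemma pv_step_map (n : Nat) (g : Nat → Int) (hn : 1 ≤ n) :
    pvFaroStep ((List.range n).map g) = (List.range n).map (fun k => g (pvSigma n k)) := by
  unfold pvFaroStep
  simp only [List.nil_append]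
  rw [pv_slice_evens, pv_slice_odds n g hn]
  have hrange : List.range n
      = List.range ((n+1)/2) ++ (List.range (n/2)).map (fun k => (n+1)/2 + k) := by
    conv_lhs => rw [show n = (n+1)/2 + n/2 from by omega]
    rw [List.range_add]
  rw [hrange, List.map_append, List.map_map]
  congr 1
  · apply List.map_congr_left
    intro k hk
    simp only [List.mem_range] at hk
    simp [pvSigma, hk]
  · apply List.map_congr_left
    intro k hk
    simp only [List.mem_range] at hk
    simp only [Function.comp, pvSigma]
    rw [if_neg (by omega)]
    congr 1
    omega

lemma pv_step_L (n i : Nat) (hn : 1 ≤ n) :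
    pvFaroStep (pvL n i) = pvL n (i+1) := by
  unfold pvL
  rw [pv_step_map n _ hn]
  apply List.map_congr_left
  intro k _
  rw [Function.iterate_succ_apply]

-- with m = n (n odd) or n-1 (n even) one has 2*((n+1)/2) = m+1, and σ acts as
-- k ↦ 2k mod m on k < m (and fixes the last position n-1 = m when n is even)
lemma pv_sigma_mod (n m k : Nat) (h2h : 2*((n+1)/2) = m + 1) (hk : k < m) :
    pvSigma n k = 2*k % m := by
  unfold pvSigma
  split
  · rw [Nat.mod_eq_of_lt (by omega)]
  · rw [Nat.mod_eq_sub_mod (by omega), Nat.mod_eq_of_lt (by omega)]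
    omega

lemma pv_sigma_last (n m : Nat) (h2h : 2*((n+1)/2) = m + 1) (hnm : n = m + 1) :
    pvSigma n (n-1) = n-1 := by
  unfold pvSigma
  rw [if_neg (by omega)]
  omega

lemma pv_iter_mod (n m : Nat) (h2h : 2*((n+1)/2) = m + 1) (hm : 1 ≤ m) :
    ∀ i k, k < m → (pvSigma n)^[i] k = 2^i * k % m := by
  intro i
  induction i with
  | zero => intro k hk; simp [Nat.mod_eq_of_lt hk]
  | succ i ih =>
    intro k hk
    rw [Function.iterate_succ_apply, pv_sigma_mod n m k h2h hk,
        ih _ (Nat.mod_lt _ (by omega)), Nat.mul_mod_mod, pow_succ]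
    ring_nf

lemma pv_L_eq_iff (n m : Nat) (h2h : 2*((n+1)/2) = m + 1) (hm3 : 3 ≤ m)
    (hnm : m ≤ n ∧ n ≤ m + 1) (i : Nat) :
    (pvL n i = pvL n 0 ↔ 2^i % m = 1) := by
  unfold pvL
  rw [List.map_eq_map_iff]
  constructor
  · intro h
    have h1 := h 1 (by simp only [List.mem_range]; omega)
    simp only [Function.iterate_zero, id] at h1
    have h1' : (pvSigma n)^[i] 1 = 1 := by exact_mod_cast h1
    rw [pv_iter_mod n m h2h (by omega) i 1 (by omega)] at h1'
    simpa using h1'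
  · intro h k hk
    simp only [List.mem_range] at hk
    simp only [Function.iterate_zero, id]
    by_cases hkm : k < m
    · rw [pv_iter_mod n m h2h (by omega) i k hkm]
      norm_cast
      calc 2^i * k % m = (2^i % m) * k % m := (Nat.mod_mul_mod ..).symm
        _ = 1 * k % m := by rw [h]
        _ = k := by rw [one_mul, Nat.mod_eq_of_lt hkm]
    · have hkm' : k = m ∧ n = m + 1 := by omega
      have hkn1 : k = n - 1 := by omega
      subst hkn1
      rw [Function.iterate_fixed (pv_sigma_last n m h2h hkm'.2)]

lemma pv_loopA (n N : Nat) (hn : 1 ≤ n) (hN : 1 ≤ N)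
    (hmin : ∀ j, 1 ≤ j → j < N → pvL n j ≠ pvL n 0) (hend : pvL n N = pvL n 0) :
    ∀ fuel i, i ≤ N → N - i < fuel →
      pvFaroLoop (pvL n 0) fuel (pvL n i) (i : Int) = (N : Int) := by
  intro fuel
  induction fuel with
  | zero => intro i _ h; omega
  | succ fuel ih =>
    intro i hiN hfuel
    by_cases hi : i = N
    · subst hi
      rw [pvFaroLoop, if_neg (by
        simp only [Bool.or_eq_true, bne_iff_ne, beq_iff_eq, not_or, Decidable.not_not]
        exact ⟨hend, Int.natCast_ne_zero.mpr (by omega)⟩)]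
    · have hilt : i < N := by omega
      rw [pvFaroLoop, if_pos (by
        simp only [Bool.or_eq_true, bne_iff_ne, beq_iff_eq]
        by_cases h0 : i = 0
        · right; simp [h0]
        · left; exact hmin i (by omega) hilt), pv_step_L n i hn]
      have hcast : (i : Int) + 1 = ((i + 1 : Nat) : Int) := by push_cast; ring
      rw [hcast]
      exact ih (i+1) (by omega) (by omega)

lemma pv_loopB (m N : Nat) (hm : 2 ≤ m) (hN : 1 ≤ N)
    (hmin : ∀ j, 1 ≤ j → j < N → 2^j % m ≠ 1) (hend : 2^N % m = 1) :
    ∀ fuel c, 1 ≤ c → c ≤ N → N - c < fuel →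
      pvOrdLoop (m : Int) fuel ((2^c % m : Nat) : Int) (c : Int) = (N : Int) := by
  intro fuel
  induction fuel with
  | zero => intro c _ _ h; omega
  | succ fuel ih =>
    intro c hc hcN hfuel
    by_cases hcn : c = N
    · subst hcn
      rw [pvOrdLoop, if_neg (not_not_intro (by exact_mod_cast hend))]
    · have hclt : c < N := by omega
      rw [pvOrdLoop, if_pos]
      · have hnat : (2^c % m) * 2 % m = 2^(c+1) % m := by
          rw [Nat.mod_mul_mod, pow_succ]
        have ht : PySem.Int.mod (((2^c % m : Nat) : Int) * 2) (m : Int)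
            = ((2^(c+1) % m : Nat) : Int) := by
          rw [PySem.Int.mod_eq_emod_of_pos (by exact_mod_cast Nat.lt_of_lt_of_le Nat.zero_lt_two hm),
              show ((2^c % m : Nat) : Int) * 2 = (((2^c % m) * 2 : Nat) : Int) from by push_cast; ring,
              ← Int.natCast_mod, hnat]
        rw [ht]
        have hcast : (c : Int) + 1 = ((c + 1 : Nat) : Int) := by push_cast; ring
        rw [hcast]
        exact ih (c+1) (by omega) (by omega) (by omega)
      · have := hmin c hc hclt
        exact_mod_cast this

-- ===== VERDICT (by name: the statement is the Claim_ definition above) =====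
theorem faro_cycles_spec : Claim_equal_faro_cycles := by
  unfold Claim_equal_faro_cycles
  intro ds _
  unfold Spec_faro_cycles
  by_cases hds : ds < 3
  · rw [faro_cycles_alt, if_pos hds]
    by_cases hle : ds ≤ 0
    · have h0 : ds.toNat = 0 := by omega
      have hnil : PySem.List.pyRange 0 ds 1 = [] := PySem.List.pyRange_one_eq_nil (by omega)
      unfold faro_cycles
      rw [hnil, h0]
      decide
    · interval_cases ds <;> decide
  · have h3 : 3 ≤ ds := by omega
    obtain ⟨n, hdn⟩ : ∃ n : Nat, (n : Int) = ds := ⟨ds.toNat, by omega⟩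
    have hn3 : 3 ≤ n := by omega
    obtain ⟨mN, hmcase⟩ : ∃ m : Nat, (n % 2 = 1 ∧ m = n) ∨ (n % 2 = 0 ∧ m = n - 1) := by
      rcases Nat.mod_two_eq_zero_or_one n with h|h
      · exact ⟨n - 1, Or.inr ⟨h, rfl⟩⟩
      · exact ⟨n, Or.inl ⟨h, rfl⟩⟩
    have h2h : 2 * ((n+1)/2) = mN + 1 := by rcases hmcase with ⟨h,hm⟩|⟨h,hm⟩ <;> omega
    have hm3 : 3 ≤ mN := by rcases hmcase with ⟨h,hm⟩|⟨h,hm⟩ <;> omega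
    have hmodd : mN % 2 = 1 := by rcases hmcase with ⟨h,hm⟩|⟨h,hm⟩ <;> omega
    have hnm : mN ≤ n ∧ n ≤ mN + 1 := by rcases hmcase with ⟨h,hm⟩|⟨h,hm⟩ <;> omega
    have hcop : Nat.Coprime 2 mN := Nat.coprime_two_left.mpr (Nat.odd_iff.mpr hmodd)
    have hex : ∃ j, 1 ≤ j ∧ 2^j % mN = 1 := by
      refine ⟨mN.totient, Nat.totient_pos.mpr (by omega), ?_⟩
      calc 2 ^ mN.totient % mN = 1 % mN := Nat.ModEq.pow_totient hcop
        _ = 1 := Nat.mod_eq_of_lt (by omega)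
    obtain ⟨hN1, hNend⟩ := Nat.find_spec hex
    have hNmin : ∀ j, 1 ≤ j → j < Nat.find hex → 2^j % mN ≠ 1 := fun j h1 hj hc =>
      Nat.find_min hex hj ⟨h1, hc⟩
    have hNlt : Nat.find hex < mN :=
      lt_of_le_of_lt (Nat.find_min' hex ⟨Nat.totient_pos.mpr (by omega), by
        calc 2 ^ mN.totient % mN = 1 % mN := Nat.ModEq.pow_totient hcop
          _ = 1 := Nat.mod_eq_of_lt (by omega)⟩)
        (Nat.totient_lt mN (by omega))
    have hBm : pvM ds = (mN : Int) := by
      unfold pvM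
      rw [PySem.Int.mod_eq_emod_of_pos (by omega)]
      split_ifs with hpar
      · rcases hmcase with ⟨h,hm⟩|⟨h,hm⟩ <;> omega
      · rcases hmcase with ⟨h,hm⟩|⟨h,hm⟩ <;> omega
    have halt : faro_cycles_alt ds = (Nat.find hex : Int) := by
      rw [faro_cycles_alt, if_neg (by omega), hBm,
          show ((mN : Int)).toNat = mN from by omega]
      have ht0 : PySem.Int.mod 2 (mN : Int) = ((2^1 % mN : Nat) : Int) := by
        rw [PySem.Int.mod_eq_emod_of_pos (by omega), pow_one,
            Nat.mod_eq_of_lt (show 2 < mN from by omega),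
            Int.emod_eq_of_lt (by omega) (by omega)]
        norm_num
      rw [ht0]
      have := pv_loopB mN (Nat.find hex) (by omega) hN1 hNmin hNend mN 1
        (le_refl 1) hN1 (by omega)
      exact_mod_cast this
    have hbar : PySem.List.pyRange 0 ds 1 = pvL n 0 := by
      rw [PySem.List.pyRange_one]
      unfold pvL
      rw [show (ds - 0).toNat = n from by omega]
      apply List.map_congr_left
      intro k _
      simp
    have hA : faro_cycles ds = (Nat.find hex : Int) := by
      simp only [faro_cycles]
      rw [hbar, show ds.toNat = n from by omega]
      have hmin' : ∀ j, 1 ≤ j → j < Nat.find hex → pvL n j ≠ pvL n 0 := fun j h1 hj => by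
        rw [Ne, pv_L_eq_iff n mN h2h hm3 hnm j]; exact hNmin j h1 hj
      have hend' : pvL n (Nat.find hex) = pvL n 0 :=
        (pv_L_eq_iff n mN h2h hm3 hnm (Nat.find hex)).mpr hNend
      have := pv_loopA n (Nat.find hex) (by omega) hN1 hmin' hend' (n+2) 0
        (by omega) (by omega)
      exact_mod_cast this
    rw [hA, halt]
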